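-- pv_equiv track=rewrite | github.com/uzo-o/bass-tab-generator | tab_generator.py | make_note_lists
-- ===== SOURCE A (Python) =====
-- def make_note_lists(all_notes):
--     """
--     Transfer fret numbers/rests to appropriate lists
--     :param all_notes: input file tokens
--     :return: list of all strings, each containing a list of their chosen frets
--     """
--     e_notes = []
--     a_notes = []
--     d_notes = []
--     g_notes = []
--     note_lists = [e_notes, a_notes, d_notes, g_notes]
--
--     while len(all_notes) > 0:
--         token = all_notes.pop(0)
--         if token == "E":
--             fret = all_notes.pop(0)
--             e_notes.append(fret)
--             a_notes.append("-" * len(fret))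
--             d_notes.append("-" * len(fret))
--             g_notes.append("-" * len(fret))
--         elif token == "A":
--             fret = all_notes.pop(0)
--             a_notes.append(fret)
--             e_notes.append("-" * len(fret))
--             d_notes.append("-" * len(fret))
--             g_notes.append("-" * len(fret))
--         elif token == "D":
--             fret = all_notes.pop(0)
--             d_notes.append(fret)
--             e_notes.append("-" * len(fret))
--             a_notes.append("-" * len(fret))
--             g_notes.append("-" * len(fret))
--         elif token == "G":
--             fret = all_notes.pop(0)
--             g_notes.append(fret)
--             e_notes.append("-" * len(fret))
--             a_notes.append("-" * len(fret))
--             d_notes.append("-" * len(fret))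
--         elif token == "-":
--             for note_list in note_lists:
--                 note_list.append("-")
--
--     return note_lists
-- ===== SOURCE B (Python) =====
-- def make_note_lists(all_notes):
--     """
--     Two-pass version: parse tokens into (string_index, fret)/rest events,
--     then render the four string lists from the events.
--     Consumes all_notes with pop(0), like the original.
--     """
--     STRING_INDEX = {"E": 0, "A": 1, "D": 2, "G": 3}
--     events = []
--     while all_notes:
--         token = all_notes.pop(0)
--         if token == "-":
--             events.append(None)
--         elif token in STRING_INDEX:
--             fret = all_notes.pop(0)
--             events.append((STRING_INDEX[token], fret))
--         # any other token is skipped, as in the original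
--
--     lists = [[], [], [], []]
--     for ev in events:
--         if ev is None:
--             for lst in lists:
--                 lst.append("-")
--         else:
--             i, fret = ev
--             pad = "-" * len(fret)
--             for j in range(4):
--                 lists[j].append(fret if j == i else pad)
--     return lists
-- ===== Notes on version B (the rewrite author's own statement) =====
-- stated objective: alternative
-- what changed: A's single interleaved loop that dispatches and appends to the four lists per branch is replaced by a parse pass that turns the token stream into a list of (string_index, fret)/rest events followed by an index-driven render pass that builds the four lists from the events.
import Mathlib
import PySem

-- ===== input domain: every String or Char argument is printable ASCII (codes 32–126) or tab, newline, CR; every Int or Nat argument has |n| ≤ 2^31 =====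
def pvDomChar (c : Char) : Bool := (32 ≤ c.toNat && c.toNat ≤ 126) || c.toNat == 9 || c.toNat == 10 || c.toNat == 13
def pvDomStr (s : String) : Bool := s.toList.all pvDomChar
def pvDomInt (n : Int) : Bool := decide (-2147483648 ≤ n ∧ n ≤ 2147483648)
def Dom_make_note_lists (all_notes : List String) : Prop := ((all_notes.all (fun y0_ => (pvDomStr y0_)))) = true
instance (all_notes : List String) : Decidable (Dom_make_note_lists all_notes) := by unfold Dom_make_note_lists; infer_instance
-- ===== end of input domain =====

-- B replaces A's interleaved single loop with a parse pass (tokens → events) and a render pass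
-- (events → four lists): an alternative decomposition, same cost. Both Pythons empty all_notes in
-- place via pop(0); the equivalence proved here is about the return value.

-- ===== PORT A =====
-- "-" * len(fret): len on a Python str is the number of code points = toList.length (exact)
def pvDashes (f : String) : String := String.ofList (List.replicate f.toList.length '-')

def pvALoop : List String → List String → List String → List String → List String → List (List String)
  | [], e, a, d, g => [e, a, d, g]
  | t :: rest, e, a, d, g =>
    if t = "E" then
      match rest with
      | [] => [e, a, d, g]   -- Python raises IndexError here; excluded by Pre_
      | f :: rest' => pvALoop rest' (e ++ [f]) (a ++ [pvDashes f]) (d ++ [pvDashes f]) (g ++ [pvDashes f])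
    else if t = "A" then
      match rest with
      | [] => [e, a, d, g]   -- IndexError; excluded by Pre_
      | f :: rest' => pvALoop rest' (e ++ [pvDashes f]) (a ++ [f]) (d ++ [pvDashes f]) (g ++ [pvDashes f])
    else if t = "D" then
      match rest with
      | [] => [e, a, d, g]   -- IndexError; excluded by Pre_
      | f :: rest' => pvALoop rest' (e ++ [pvDashes f]) (a ++ [pvDashes f]) (d ++ [f]) (g ++ [pvDashes f])
    else if t = "G" then
      match rest with
      | [] => [e, a, d, g]   -- IndexError; excluded by Pre_
      | f :: rest' => pvALoop rest' (e ++ [pvDashes f]) (a ++ [pvDashes f]) (d ++ [pvDashes f]) (g ++ [f])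
    else if t = "-" then pvALoop rest (e ++ ["-"]) (a ++ ["-"]) (d ++ ["-"]) (g ++ ["-"])
    else pvALoop rest e a d g

def make_note_lists (all_notes : List String) : List (List String) :=
  pvALoop all_notes [] [] [] []

-- ===== PORT B =====
def pvStringIndex : PySem.Dict String Nat :=
  PySem.Dict.ofList [("E", 0), ("A", 1), ("D", 2), ("G", 3)]

-- first pass: tokens → events (none = rest, some (i, fret) = fret on string i)
def pvParse : List String → List (Option (Nat × String))
  | [] => []
  | t :: rest =>
    if t = "-" then none :: pvParse rest
    else
      match pvStringIndex.get? t with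
      | some i =>
        match rest with
        | [] => []           -- Python raises IndexError here; excluded by Pre_
        | f :: rest' => some (i, f) :: pvParse rest'
      | none => pvParse rest -- unknown token skipped

-- second pass: one render step per event
def pvStep (st : List String × List String × List String × List String)
    (ev : Option (Nat × String)) : List String × List String × List String × List String :=
  match ev with
  | none => (st.1 ++ ["-"], st.2.1 ++ ["-"], st.2.2.1 ++ ["-"], st.2.2.2 ++ ["-"])
  | some (i, f) =>
    let pad := pvDashes f
    (st.1 ++ [if i = 0 then f else pad], st.2.1 ++ [if i = 1 then f else pad],
     st.2.2.1 ++ [if i = 2 then f else pad], st.2.2.2 ++ [if i = 3 then f else pad])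

def make_note_lists_alt (all_notes : List String) : List (List String) :=
  let st := (pvParse all_notes).foldl pvStep ([], [], [], [])
  [st.1, st.2.1, st.2.2.1, st.2.2.2]

-- ===== PRECONDITION & SPEC =====
-- Pre_ excludes exactly the inputs with a dangling string-name token: a token "E"/"A"/"D"/"G"
-- (read as a command, i.e. not itself consumed as the fret of the preceding name) that is the last
-- token of the list — there Python A (and B) raise IndexError from pop(0) of the missing fret.
-- Stated as: a left-to-right scan with an 'expecting a fret' flag must not end expecting one.
def Pre_make_note_lists (all_notes : List String) : Prop :=
  (all_notes.foldl
    (fun expecting t =>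
      if expecting then false else (t == "E" || t == "A" || t == "D" || t == "G"))
    false) = false
instance (all_notes : List String) : Decidable (Pre_make_note_lists all_notes) := by
  unfold Pre_make_note_lists; infer_instance

def pvWitness_make_note_lists : List String := ["E", "3", "-", "x", "G", "12"]

def Spec_make_note_lists (all_notes : List String) (out : List (List String)) : Prop := out = make_note_lists_alt all_notes
instance (all_notes : List String) (out : List (List String)) : Decidable (Spec_make_note_lists all_notes out) := by unfold Spec_make_note_lists; infer_instance

-- ===== CLAIM (what is proved, stated in full; the proofs are below) =====
def Claim_equal_make_note_lists : Prop := ∀ (all_notes : List String), Dom_make_note_lists all_notes → Pre_make_note_lists all_notes → Spec_make_note_lists all_notes (make_note_lists all_notes)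

-- ===== LEMMAS AND PROOFS =====
lemma pvStringIndex_get? (t : String) : pvStringIndex.get? t =
    if t = "E" then some 0 else if t = "A" then some 1 else if t = "D" then some 2
    else if t = "G" then some 3 else none := by
  have h : pvStringIndex = PySem.Dict.mk [("E",0),("A",1),("D",2),("G",3)] := by decide
  rw [h]
  by_cases h1 : t = "E" <;> by_cases h2 : t = "A" <;> by_cases h3 : t = "D" <;> by_cases h4 : t = "G" <;>
    simp [PySem.Dict.get?, h1, h2, h3, h4]
  exact ⟨fun e => h1 e.symm, fun e => h2 e.symm, fun e => h3 e.symm, fun e => h4 e.symm⟩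

lemma pvKey (xs e a d g : List String) : pvALoop xs e a d g =
    (let st := (pvParse xs).foldl pvStep (e, a, d, g); [st.1, st.2.1, st.2.2.1, st.2.2.2]) := by
  fun_induction pvALoop xs e a d g <;>
    simp_all [pvParse, pvStep, pvStringIndex_get?]

-- ===== VERDICT (by name: the statement is the Claim_ definition above) =====
theorem make_note_lists_spec : Claim_equal_make_note_lists := by
  intro xs _ _
  unfold Spec_make_note_lists make_note_lists make_note_lists_alt
  exact pvKey xs [] [] [] []
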